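-- pv_equiv track=rewrite | github.com/Rettend/civup | mods/test_luaevents.py | format_filtered_log
-- ===== SOURCE A (Python) =====
-- BLOCK_MARKERS = {
--     "ALPHACIV_STATE_BEGIN": "ALPHACIV_STATE_END",
--     "ALPHACIV_PRODUCTION_BEGIN": "ALPHACIV_PRODUCTION_END",
--     "ALPHACIV_DISTRICT_SITES_BEGIN": "ALPHACIV_DISTRICT_SITES_END",
--     "ALPHACIV_BUILDING_SITES_BEGIN": "ALPHACIV_BUILDING_SITES_END",
--     "ALPHACIV_UNIT_ACTIONS_BEGIN": "ALPHACIV_UNIT_ACTIONS_END",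
-- }
--
-- def format_filtered_log(lines: list[str], include_payload: bool = False) -> list[str]:
--     """Keep relevant AlphaCiv entries and collapse noisy JSON payload lines."""
--     output: list[str] = []
--
--     active_block_begin: str | None = None
--     active_block_end: str | None = None
--     hidden_payload_lines = 0
--
--     for raw_line in lines:
--         line = raw_line.rstrip("\r\n")
--         upper_line = line.upper()
--
--         if active_block_begin is not None:
--             if active_block_end and active_block_end in upper_line:
--                 if not include_payload and hidden_payload_lines > 0:
--                     name = active_block_begin.replace("_BEGIN", "")
--                     output.append(f"... [{name}] omitted {hidden_payload_lines} payload lines ...")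
--                 output.append(line)
--                 active_block_begin = None
--                 active_block_end = None
--                 hidden_payload_lines = 0
--                 continue
--
--             if include_payload:
--                 output.append(line)
--             else:
--                 hidden_payload_lines += 1
--             continue
--
--         begin_marker = None
--         end_marker = None
--         for begin, end in BLOCK_MARKERS.items():
--             if begin in upper_line:
--                 begin_marker = begin
--                 end_marker = end
--                 break
--
--         if begin_marker is not None:
--             output.append(line)
--             active_block_begin = begin_marker
--             active_block_end = end_marker
--             hidden_payload_lines = 0
--             continue
--
--         if not include_payload and "alphaciv_ui_v2:" in line:
--             _, _, content = line.partition("alphaciv_ui_v2:")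
--             content = content.strip()
--             if content and content[0] in '{"[':
--                 continue
--
--         if "alphaciv_ui_v2:" in line:
--             lowered_line = line.lower()
--             if "alphaciv_" not in upper_line and "alphaciv v2 ui:" not in lowered_line:
--                 continue
--
--         lowered = line.lower()
--         relevant = (
--             "alphaciv" in lowered
--             or "presets:" in lowered
--             or "runtime error" in lowered
--             or "attempt to" in lowered
--             or "command failed" in lowered
--         )
--         if relevant:
--             output.append(line)
--
--     return output
-- ===== SOURCE B (Python) =====
-- BLOCK_MARKERS = {
--     "ALPHACIV_STATE_BEGIN": "ALPHACIV_STATE_END",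
--     "ALPHACIV_PRODUCTION_BEGIN": "ALPHACIV_PRODUCTION_END",
--     "ALPHACIV_DISTRICT_SITES_BEGIN": "ALPHACIV_DISTRICT_SITES_END",
--     "ALPHACIV_BUILDING_SITES_BEGIN": "ALPHACIV_BUILDING_SITES_END",
--     "ALPHACIV_UNIT_ACTIONS_BEGIN": "ALPHACIV_UNIT_ACTIONS_END",
-- }
--
--
-- def _keep(line: str, upper_line: str, include_payload: bool) -> bool:
--     """Relevance filter for lines outside payload blocks, as one boolean predicate."""
--     if not include_payload and "alphaciv_ui_v2:" in line:
--         content = line.partition("alphaciv_ui_v2:")[2].strip()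
--         if content and content[0] in '{"[':
--             return False
--     if "alphaciv_ui_v2:" in line:
--         if "alphaciv_" not in upper_line and "alphaciv v2 ui:" not in line.lower():
--             return False
--     low = line.lower()
--     return any(k in low for k in
--                ("alphaciv", "presets:", "runtime error", "attempt to", "command failed"))
--
--
-- def format_filtered_log(lines: list[str], include_payload: bool = False) -> list[str]:
--     """Keep relevant AlphaCiv entries and collapse noisy JSON payload lines."""
--     output: list[str] = []
--     n = len(lines)
--     i = 0
--     while i < n:
--         line = lines[i].rstrip("\r\n")
--         upper_line = line.upper()
--         hit = next(((b, e) for b, e in BLOCK_MARKERS.items() if b in upper_line), None)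
--         if hit is not None:
--             begin, end = hit
--             output.append(line)
--             payload: list[str] = []
--             j = i + 1
--             while j < n:
--                 inner = lines[j].rstrip("\r\n")
--                 if end in inner.upper():
--                     if include_payload:
--                         output.extend(payload)
--                     elif payload:
--                         name = begin.replace("_BEGIN", "")
--                         output.append(f"... [{name}] omitted {len(payload)} payload lines ...")
--                     output.append(inner)
--                     break
--                 payload.append(inner)
--                 j += 1
--             else:
--                 if include_payload:
--                     output.extend(payload)
--             i = j + 1
--             continue
--         if _keep(line, upper_line, include_payload):
--             output.append(line)
--         i += 1
--     return output
-- ===== Notes on version B (the rewrite author's own statement) =====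
-- stated objective: alternative
-- what changed: Replaces A's single pass with three state variables (active begin/end markers and a hidden-line counter) by an explicit index over the lines with a nested scan-ahead loop that consumes each payload block in one inner pass, and folds A's continue-chain relevance filtering into one boolean predicate helper.
import Mathlib
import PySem

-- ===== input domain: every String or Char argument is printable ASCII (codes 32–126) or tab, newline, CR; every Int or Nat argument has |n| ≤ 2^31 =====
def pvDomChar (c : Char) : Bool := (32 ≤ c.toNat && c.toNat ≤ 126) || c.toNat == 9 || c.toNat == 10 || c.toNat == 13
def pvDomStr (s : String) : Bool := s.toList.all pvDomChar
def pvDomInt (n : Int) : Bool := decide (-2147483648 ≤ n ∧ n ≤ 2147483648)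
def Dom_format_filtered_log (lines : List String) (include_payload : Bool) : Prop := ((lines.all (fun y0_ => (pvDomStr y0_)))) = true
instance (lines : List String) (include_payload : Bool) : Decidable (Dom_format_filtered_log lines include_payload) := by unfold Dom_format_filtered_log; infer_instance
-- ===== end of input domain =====

-- B replaces A's active-block state flags by an explicit nested scan-ahead loop per block (objective: alternative, same cost).

-- ===== PORT A =====
-- s.rstrip("\r\n"): drop trailing '\r'/'\n' characters (exact; PySem has no rstrip-with-chars)
def pyRstripCRLF (cs : List Char) : List Char :=
  (cs.reverse.dropWhile (fun c => c == '\r' || c == '\n')).reverse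

def aMarkers : List (List Char × List Char) :=
  [("ALPHACIV_STATE_BEGIN".toList, "ALPHACIV_STATE_END".toList),
   ("ALPHACIV_PRODUCTION_BEGIN".toList, "ALPHACIV_PRODUCTION_END".toList),
   ("ALPHACIV_DISTRICT_SITES_BEGIN".toList, "ALPHACIV_DISTRICT_SITES_END".toList),
   ("ALPHACIV_BUILDING_SITES_BEGIN".toList, "ALPHACIV_BUILDING_SITES_END".toList),
   ("ALPHACIV_UNIT_ACTIONS_BEGIN".toList, "ALPHACIV_UNIT_ACTIONS_END".toList)]

-- the for-loop with its three state variables, one recursive step per line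
def aLoop (ip : Bool) (lines : List String) (output : List String)
    (activeB : Option (List Char)) (activeE : Option (List Char)) (hidden : Int) : List String :=
  match lines with
  | [] => output
  | raw :: rest =>
    let line : List Char := pyRstripCRLF raw.toList
    let upper := PySem.Chars.upper line
    match activeB with
    | some ab =>
      let endHit : Bool := match activeE with
        | some ae => !ae.isEmpty && PySem.Chars.isIn ae upper
        | none => false
      if endHit then
        let out1 := if !ip && hidden > 0 then
            output ++ [String.ofList ("... [".toList ++ PySem.Chars.replace ab "_BEGIN".toList []
              ++ "] omitted ".toList ++ PySem.Int.toChars hidden ++ " payload lines ...".toList)]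
          else output
        aLoop ip rest (out1 ++ [String.ofList line]) none none 0
      else if ip then aLoop ip rest (output ++ [String.ofList line]) (some ab) activeE hidden
      else aLoop ip rest output (some ab) activeE (hidden + 1)
    | none =>
      match aMarkers.find? (fun p => PySem.Chars.isIn p.1 upper) with
      | some (b, e) => aLoop ip rest (output ++ [String.ofList line]) (some b) (some e) 0
      | none =>
        let ui := "alphaciv_ui_v2:".toList
        -- line.partition(ui)[2] under the guard 'ui in line': text after the first occurrence (Chars.find is the first occurrence)
        let skip1 : Bool := !ip && PySem.Chars.isIn ui line &&
          (let content := PySem.Chars.strip (line.drop ((PySem.Chars.find line ui).toNat + ui.length))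
           match content with
           | c :: _ => c == '{' || c == '"' || c == '['
           | [] => false)
        let skip2 : Bool := PySem.Chars.isIn ui line &&
          (!PySem.Chars.isIn "alphaciv_".toList upper &&
           !PySem.Chars.isIn "alphaciv v2 ui:".toList (PySem.Chars.lower line))
        let lowered := PySem.Chars.lower line
        let relevant : Bool :=
          PySem.Chars.isIn "alphaciv".toList lowered || PySem.Chars.isIn "presets:".toList lowered ||
          PySem.Chars.isIn "runtime error".toList lowered || PySem.Chars.isIn "attempt to".toList lowered ||
          PySem.Chars.isIn "command failed".toList lowered
        if skip1 then aLoop ip rest output none none hidden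
        else if skip2 then aLoop ip rest output none none hidden
        else if relevant then aLoop ip rest (output ++ [String.ofList line]) none none hidden
        else aLoop ip rest output none none hidden

def format_filtered_log (lines : List String) (include_payload : Bool) : List String :=
  aLoop include_payload lines [] none none 0

-- ===== PORT B =====
def bMarkers : List (List Char × List Char) :=
  [("ALPHACIV_STATE_BEGIN".toList, "ALPHACIV_STATE_END".toList),
   ("ALPHACIV_PRODUCTION_BEGIN".toList, "ALPHACIV_PRODUCTION_END".toList),
   ("ALPHACIV_DISTRICT_SITES_BEGIN".toList, "ALPHACIV_DISTRICT_SITES_END".toList),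
   ("ALPHACIV_BUILDING_SITES_BEGIN".toList, "ALPHACIV_BUILDING_SITES_END".toList),
   ("ALPHACIV_UNIT_ACTIONS_BEGIN".toList, "ALPHACIV_UNIT_ACTIONS_END".toList)]

-- _keep: the relevance predicate, early returns folded in order
def bKeep (line : List Char) (upper : List Char) (include_payload : Bool) : Bool :=
  let ui := "alphaciv_ui_v2:".toList
  -- first early return: line.partition(ui)[2] under the guard 'ui in line' (Chars.find is the first occurrence)
  let bad1 : Bool := !include_payload && PySem.Chars.isIn ui line &&
    (let content := PySem.Chars.strip (line.drop ((PySem.Chars.find line ui).toNat + ui.length))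
     match content with
     | c :: _ => c == '{' || c == '"' || c == '['
     | [] => false)
  -- second early return
  let bad2 : Bool := PySem.Chars.isIn ui line &&
    (!PySem.Chars.isIn "alphaciv_".toList upper &&
     !PySem.Chars.isIn "alphaciv v2 ui:".toList (PySem.Chars.lower line))
  if bad1 then false
  else if bad2 then false
  else
    let low := PySem.Chars.lower line
    PySem.Chars.isIn "alphaciv".toList low || PySem.Chars.isIn "presets:".toList low ||
    PySem.Chars.isIn "runtime error".toList low || PySem.Chars.isIn "attempt to".toList low ||
    PySem.Chars.isIn "command failed".toList low

-- the inner while-loop: collect rstripped payload lines until one whose upper contains the end marker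
def bScanEnd (ae : List Char) (lines : List String) : List String × Option (String × List String) :=
  match lines with
  | [] => ([], none)
  | raw :: rest =>
    let inner := pyRstripCRLF raw.toList
    if PySem.Chars.isIn ae (PySem.Chars.upper inner) then ([], some (String.ofList inner, rest))
    else
      let (p, r) := bScanEnd ae rest
      (String.ofList inner :: p, r)

-- (termination fact for bGo: the lines after the end marker are a strict sub-suffix)
theorem bScanEnd_snd_length (ae : List Char) (lines : List String) (e : String) (r : List String)
    (h : (bScanEnd ae lines).2 = some (e, r)) : r.length < lines.length := by
  induction lines with
  | nil => simp [bScanEnd] at h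
  | cons raw rest ih =>
    simp only [bScanEnd] at h
    split at h
    · simp_all
    · simp only at h
      exact Nat.lt_succ_of_lt (ih h)

def bGo (ip : Bool) (lines : List String) : List String :=
  match lines with
  | [] => []
  | raw :: rest =>
    let line := pyRstripCRLF raw.toList
    let upper := PySem.Chars.upper line
    match bMarkers.find? (fun p => PySem.Chars.isIn p.1 upper) with
    | some (b, ae) =>
      match h2 : bScanEnd ae rest with
      | (payload, some (endLine, rest')) =>
        String.ofList line ::
          ((if ip then payload
            else if payload.length > 0 then
              [String.ofList ("... [".toList ++ PySem.Chars.replace b "_BEGIN".toList []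
                ++ "] omitted ".toList ++ PySem.Int.toChars (payload.length : Int) ++ " payload lines ...".toList)]
            else [])
           ++ (endLine :: bGo ip rest'))
      | (payload, none) => String.ofList line :: (if ip then payload else [])
    | none =>
      if bKeep line upper ip then String.ofList line :: bGo ip rest else bGo ip rest
termination_by lines.length
decreasing_by
  · exact Nat.lt_succ_of_lt (bScanEnd_snd_length ae rest endLine rest' (by rw [h2]))
  · simp
  · simp

def format_filtered_log_alt (lines : List String) (include_payload : Bool) : List String :=
  bGo include_payload lines

-- ===== PRECONDITION & SPEC =====
def Spec_format_filtered_log (lines : List String) (include_payload : Bool) (out : List String) : Prop := out = format_filtered_log_alt lines include_payload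
instance (lines : List String) (include_payload : Bool) (out : List String) : Decidable (Spec_format_filtered_log lines include_payload out) := by unfold Spec_format_filtered_log; infer_instance

-- ===== CLAIM (what is proved, stated in full; the proofs are below) =====
def Claim_equal_format_filtered_log : Prop := ∀ (lines : List String) (include_payload : Bool), Dom_format_filtered_log lines include_payload → Spec_format_filtered_log lines include_payload (format_filtered_log lines include_payload)

-- ===== LEMMAS AND PROOFS =====
theorem markers_eq : bMarkers = aMarkers := rfl

theorem aMarkers_snd_ne (p : List Char × List Char) (hp : p ∈ aMarkers) : p.2 ≠ [] := by
  fin_cases hp <;> decide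

-- the default-branch if-chain of A = B's single keep-predicate test, abstractly
theorem chain_eq (s1 s2 rel : Bool) (out : List String) (l : String) (g : List String) :
    (if s1 = true then out ++ g else if s2 = true then out ++ g
     else if rel = true then (out ++ [l]) ++ g else out ++ g)
    = out ++ (if (if s1 = true then false else if s2 = true then false else rel) = true then l :: g else g) := by
  cases s1 <;> cases s2 <;> cases rel <;> simp

-- A inside an active block = B's scan-ahead, with `hid` lines already counted
theorem aLoop_active (ip : Bool) (b ae : List Char) (hae : ae ≠ [])
    (lines : List String) (output : List String) (hid : Int) :
    aLoop ip lines output (some b) (some ae) hid =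
      match bScanEnd ae lines with
      | (payload, some (endLine, rest')) =>
        aLoop ip rest'
          ((if ip then output ++ payload
            else if hid + (payload.length : Int) > 0 then
              output ++ [String.ofList ("... [".toList ++ PySem.Chars.replace b "_BEGIN".toList []
                ++ "] omitted ".toList ++ PySem.Int.toChars (hid + (payload.length : Int)) ++ " payload lines ...".toList)]
            else output) ++ [endLine])
          none none 0
      | (payload, none) => if ip then output ++ payload else output := by
  induction lines generalizing output hid with
  | nil => cases ip <;> simp [aLoop, bScanEnd]
  | cons raw rest ih =>
    have h0 : ae.isEmpty = false := by simpa using hae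
    simp only [aLoop, bScanEnd, h0, Bool.not_false, Bool.true_and]
    by_cases hend : PySem.Chars.isIn ae (PySem.Chars.upper (pyRstripCRLF raw.toList)) = true
    · simp only [hend, if_pos]
      cases ip <;> simp
    · simp only [hend, if_neg, Bool.false_eq_true, not_false_eq_true]
      cases hscan : bScanEnd ae rest with
      | mk payload opt =>
        cases ip
        · -- not include_payload: payload line is counted
          simp only [Bool.false_eq_true, if_false]
          rw [ih output (hid + 1)]
          rw [hscan]
          cases opt with
          | none => simp
          | some pr =>
            obtain ⟨endLine, rest'⟩ := pr
            have hcast : hid + 1 + (payload.length : Int) = hid + ((String.ofList (pyRstripCRLF raw.toList) :: payload).length : Int) := by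
              simp only [List.length_cons]; push_cast; omega
            simp only [List.length_cons]
            rw [hcast]
            simp
        · -- include_payload: payload line is emitted
          simp only [if_pos]
          rw [ih (output ++ [String.ofList (pyRstripCRLF raw.toList)]) hid]
          rw [hscan]
          cases opt with
          | none => simp
          | some pr =>
            obtain ⟨endLine, rest'⟩ := pr
            simp

theorem aLoop_none (ip : Bool) (lines : List String) (output : List String) (hid : Int) :
    aLoop ip lines output none none hid = output ++ bGo ip lines := by
  cases lines with
  | nil => simp [aLoop, bGo]
  | cons raw rest =>
    rw [aLoop, bGo]
    rw [markers_eq]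
    cases hfind : aMarkers.find? (fun p => PySem.Chars.isIn p.1 (PySem.Chars.upper (pyRstripCRLF raw.toList))) with
    | some pr =>
      obtain ⟨b, ae⟩ := pr
      have hae : ae ≠ [] := aMarkers_snd_ne (b, ae) (List.mem_of_find?_eq_some hfind)
      simp only [hfind]
      rw [aLoop_active ip b ae hae rest (output ++ [String.ofList (pyRstripCRLF raw.toList)]) 0]
      cases hscan : bScanEnd ae rest with
      | mk payload opt =>
        cases opt with
        | none => cases ip <;> simp
        | some pr2 =>
          obtain ⟨endLine, rest'⟩ := pr2
          dsimp only
          have hlt : rest'.length < rest.length :=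
            bScanEnd_snd_length ae rest endLine rest' (by rw [hscan])
          have hrec := aLoop_none ip rest'
            (((if ip then (output ++ [String.ofList (pyRstripCRLF raw.toList)]) ++ payload
               else if (0:Int) + (payload.length : Int) > 0 then
                 (output ++ [String.ofList (pyRstripCRLF raw.toList)]) ++ [String.ofList ("... [".toList ++ PySem.Chars.replace b "_BEGIN".toList []
                   ++ "] omitted ".toList ++ PySem.Int.toChars ((0:Int) + (payload.length : Int)) ++ " payload lines ...".toList)]
               else (output ++ [String.ofList (pyRstripCRLF raw.toList)])) ++ [endLine])) 0
          rw [hrec]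
          cases ip
          · simp only [zero_add, Bool.false_eq_true, if_false]
            split_ifs with hA hB
            · simp
            · exfalso; omega
            · exfalso; omega
            · simp
          · simp
    | none =>
      have hr1 := aLoop_none ip rest output hid
      have hr2 := aLoop_none ip rest (output ++ [String.ofList (pyRstripCRLF raw.toList)]) hid
      rw [hr1, hr2]
      clear hr1 hr2
      exact chain_eq _ _ _ _ _ _
termination_by lines.length
decreasing_by all_goals (simp only [List.length_cons]; omega)

-- ===== VERDICT (by name: the statement is the Claim_ definition above) =====
theorem format_filtered_log_spec : Claim_equal_format_filtered_log := by
  intro lines ip _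
  unfold Spec_format_filtered_log format_filtered_log format_filtered_log_alt
  simpa using aLoop_none ip lines [] 0
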